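-- pv_equiv track=rewrite | github.com/jingpad-bsp/android_external_autotest | client/common_lib/cros/get_usb_devices.py | _get_cameras
-- ===== SOURCE A (Python) =====
-- CAMERA_MAP = {'2bd9:0011': 'Huddly GO',
--               '046d:0843': 'Logitech Webcam C930e',
--               '046d:082d': 'HD Pro Webcam C920',
--               '046d:0853': 'PTZ Pro Camera'}
--
-- def _get_vid_and_pid(vid_pid):
--   """Parses out Vendor ID and Product ID from vid:pid string.
--
--   @param vid_pid String on format vid:pid.
--   @returns (vid,pid) tuple
--   """
--   assert ':' in vid_pid
--   return vid_pid.split(':')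
--
-- def _get_cameras(usbdata):
--     """get number of camera for each type
--     @param usbdata  list of dictionary for usb devices
--     @returns list of dictionary, key is VID_PID, value is number of cameras
--     """
--     number_camera = {}
--     for _camera in CAMERA_MAP:
--       vid, pid = _get_vid_and_pid(_camera)
--       _number = 0
--       for _data in usbdata:
--         if _data['Vendor'] == vid and _data['ProdID'] == pid:
--           _number += 1
--       number_camera[_camera] = _number
--     return number_camera
-- ===== SOURCE B (Python) =====
-- CAMERA_MAP = {'2bd9:0011': 'Huddly GO',
--               '046d:0843': 'Logitech Webcam C930e',
--               '046d:082d': 'HD Pro Webcam C920',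
--               '046d:0853': 'PTZ Pro Camera'}
--
-- def _get_cameras(usbdata):
--     """Single tally pass over usbdata, then one lookup per camera type.
--
--     'Vendor' is required of every device (as in the nested-scan version);
--     'ProdID' may be absent, in which case the device matches no camera.
--     """
--     counts = {}
--     for _data in usbdata:
--         key = (_data['Vendor'], _data.get('ProdID'))
--         counts[key] = counts.get(key, 0) + 1
--     return {_camera: counts.get(tuple(_camera.split(':')), 0)
--             for _camera in CAMERA_MAP}
-- ===== Notes on version B (the rewrite author's own statement) =====
-- stated objective: faster
-- what changed: Replaces the nested scan (one full pass over usbdata per camera type) with a single tally pass building a (Vendor,ProdID) counter followed by one lookup per camera type.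
import Mathlib
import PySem

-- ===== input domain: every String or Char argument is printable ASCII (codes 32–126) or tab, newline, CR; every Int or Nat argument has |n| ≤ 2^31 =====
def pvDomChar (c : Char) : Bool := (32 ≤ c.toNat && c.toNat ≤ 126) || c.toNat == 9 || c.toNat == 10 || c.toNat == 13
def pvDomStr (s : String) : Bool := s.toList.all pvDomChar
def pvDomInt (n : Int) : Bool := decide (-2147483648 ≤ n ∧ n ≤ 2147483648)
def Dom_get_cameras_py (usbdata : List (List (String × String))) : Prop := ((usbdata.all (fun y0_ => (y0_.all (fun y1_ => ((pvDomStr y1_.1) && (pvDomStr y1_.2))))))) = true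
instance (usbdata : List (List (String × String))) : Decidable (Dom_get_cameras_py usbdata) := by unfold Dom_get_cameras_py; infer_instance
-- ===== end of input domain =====

-- B replaces A's per-camera rescan of usbdata with one (Vendor,ProdID) tally pass plus one lookup
-- per camera type (objective: faster by a constant factor, one pass instead of four).

-- keys of CAMERA_MAP in insertion order (the values are never read by the function)
def pvCameraKeys : List String := ["2bd9:0011", "046d:0843", "046d:082d", "046d:0853"]

-- ===== PORT A =====
-- _get_vid_and_pid: vid_pid.split(':'); exact here since the separator is nonempty and every
-- CAMERA_MAP key contains ':' (the assert holds); 'vid, pid = …' unpacks the 2 parts.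
def get_vid_and_pid (vid_pid : String) : List String := (PySem.Str.split? vid_pid ":").getD []

def get_cameras_py (usbdata : List (List (String × String))) : List (String × Int) :=
  (pvCameraKeys.foldl (fun number_camera cam =>
      let vp := get_vid_and_pid cam
      let vid := vp.headD ""
      let pid := vp[1]?.getD ""
      let n : Int := usbdata.foldl (fun n d =>
        -- _data['Vendor'] == vid and _data['ProdID'] == pid; inside Pre_ both keys exist,
        -- so the get?-against-some comparison is exact
        if ((PySem.Dict.mk d).get? "Vendor" == some vid && (PySem.Dict.mk d).get? "ProdID" == some pid)
        then n + 1 else n) 0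
      number_camera.insert cam n)
    PySem.Dict.empty).items

-- ===== PORT B =====
def get_cameras_py_alt (usbdata : List (List (String × String))) : List (String × Int) :=
  let counts := usbdata.foldl (fun c d =>
      -- key = (_data['Vendor'], _data.get('ProdID')): get? none models .get's None;
      -- inside Pre_ the Vendor lookup is some, matching the indexing
      let k := ((PySem.Dict.mk d).get? "Vendor", (PySem.Dict.mk d).get? "ProdID")
      c.insert k (c.getD k 0 + 1))
    PySem.Dict.empty
  pvCameraKeys.map (fun cam =>
      let vp := (PySem.Str.split? cam ":").getD []
      (cam, counts.getD (some (vp.headD ""), some (vp[1]?.getD "")) 0))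

-- ===== PRECONDITION & SPEC =====
-- Pre_ excludes exactly the inputs where A raises KeyError: a device dict lacking 'Vendor',
-- or one whose Vendor is a camera vendor ('2bd9'/'046d') but lacking 'ProdID' (the 'and'
-- short-circuits, so a missing 'ProdID' is only touched when the Vendor matched); B raises
-- on a missing 'Vendor' too, and returns (counting the device as matching nothing) where
-- only a 'ProdID' of a non-matching device is missing.
def Pre_get_cameras_py (usbdata : List (List (String × String))) : Prop :=
  ∀ d ∈ usbdata, (PySem.Dict.mk d).contains "Vendor" = true ∧
    (((PySem.Dict.mk d).get? "Vendor" = some "2bd9" ∨ (PySem.Dict.mk d).get? "Vendor" = some "046d") →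
      (PySem.Dict.mk d).contains "ProdID" = true)
instance (usbdata : List (List (String × String))) : Decidable (Pre_get_cameras_py usbdata) := by unfold Pre_get_cameras_py; infer_instance

def pvWitness_get_cameras_py : (List (List (String × String))) :=
  [[("Vendor", "046d"), ("ProdID", "0843")], [("Vendor", "2bd9"), ("ProdID", "9999")], [("Vendor", "zzzz")]]

def Spec_get_cameras_py (usbdata : List (List (String × String))) (out : List (String × Int)) : Prop := out = get_cameras_py_alt usbdata
instance (usbdata : List (List (String × String))) (out : List (String × Int)) : Decidable (Spec_get_cameras_py usbdata out) := by unfold Spec_get_cameras_py; infer_instance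

-- ===== CLAIM (what is proved, stated in full; the proofs are below) =====
def Claim_equal_get_cameras_py : Prop := ∀ (usbdata : List (List (String × String))), Dom_get_cameras_py usbdata → Pre_get_cameras_py usbdata → Spec_get_cameras_py usbdata (get_cameras_py usbdata)

-- ===== LEMMAS AND PROOFS =====

-- A's inner scan for one (vid, pid) equals B's counter looked up at (some vid, some pid).
theorem pv_tally (u : List (List (String × String))) (vid pid : String) :
    u.foldl (fun n d =>
        if ((PySem.Dict.mk d).get? "Vendor" == some vid && (PySem.Dict.mk d).get? "ProdID" == some pid)
        then n + 1 else n) (0 : Int)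
    = (u.foldl (fun c d =>
          let k := ((PySem.Dict.mk d).get? "Vendor", (PySem.Dict.mk d).get? "ProdID")
          c.insert k (c.getD k 0 + 1)) PySem.Dict.empty).getD (some vid, some pid) 0 := by
  have hB : (u.foldl (fun c d =>
          let k := ((PySem.Dict.mk d).get? "Vendor", (PySem.Dict.mk d).get? "ProdID")
          c.insert k (c.getD k 0 + 1)) PySem.Dict.empty)
      = PySem.Dict.counter (u.map (fun d => ((PySem.Dict.mk d).get? "Vendor", (PySem.Dict.mk d).get? "ProdID"))) := by
    rw [← PySem.Dict.foldl_insert_getD_add_one_eq_counter, List.foldl_map]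
  rw [hB, PySem.Dict.getD_counter, PySem.List.foldl_count_if, List.count_eq_countP, List.countP_map]
  simp only [zero_add]
  rfl

theorem get_cameras_py_spec_aux (u : List (List (String × String))) :
    get_cameras_py u = get_cameras_py_alt u := by
  simp only [get_cameras_py, get_cameras_py_alt, pvCameraKeys, get_vid_and_pid,
    List.foldl_cons, List.foldl_nil, List.map_cons, List.map_nil]
  have s1 : (PySem.Str.split? "2bd9:0011" ":").getD [] = ["2bd9", "0011"] := by decide
  have s2 : (PySem.Str.split? "046d:0843" ":").getD [] = ["046d", "0843"] := by decide
  have s3 : (PySem.Str.split? "046d:082d" ":").getD [] = ["046d", "082d"] := by decide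
  have s4 : (PySem.Str.split? "046d:0853" ":").getD [] = ["046d", "0853"] := by decide
  simp only [s1, s2, s3, s4, List.headD_cons, List.getElem?_cons_succ, List.getElem?_cons_zero,
    Option.getD_some]
  rw [← pv_tally u "2bd9" "0011", ← pv_tally u "046d" "0843",
      ← pv_tally u "046d" "082d", ← pv_tally u "046d" "0853"]
  rfl

-- ===== VERDICT (by name: the statement is the Claim_ definition above) =====
theorem get_cameras_py_spec : Claim_equal_get_cameras_py := by
  intro u _ _
  exact get_cameras_py_spec_aux u
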